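-- pv_equiv track=rewrite | github.com/hmgu-itg/variant_annotation | functions.py | stringdiff
-- ===== SOURCE A (Python) =====
-- def stringdiff(s1,s2):
--     L=[]
--
--     t1=s2
--     t2=s1
--
--     if len(s1)<len(s2):
--         t1=s1
--         t2=s2
--
--     for i in range(len(t1)+1):
--         x1=t1[i:len(t1)]
--         x2=t1[0:i]
--         if t2.startswith(x2) and t2.endswith(x1):
--             L.append(t2[i:len(t2)-(len(t1)-i)])
--
--     return L
-- ===== SOURCE B (Python) =====
-- def _lcp(a, b):
--     k = 0
--     for x, y in zip(a, b):
--         if x != y: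
--             break
--         k += 1
--     return k
--
-- def stringdiff(s1, s2):
--     # swap so t1 is the short string (ties: t1 = s2), exactly as A orients them
--     t1, t2 = (s1, s2) if len(s1) < len(s2) else (s2, s1)
--     n, m = len(t1), len(t2)
--     p = _lcp(t1, t2)                      # longest common prefix
--     q = _lcp(t1[::-1], t2[::-1])          # longest common suffix
--     lo = max(0, n - q)
--     return [t2[i:m - n + i] for i in range(lo, p + 1)]
-- ===== Notes on version B (the rewrite author's own statement) =====
-- stated objective: faster
-- what changed: Instead of testing startswith/endswith for every split index i (an O(n) check per index), B computes the longest common prefix p and longest common suffix q of the two strings once; the valid split indices are exactly the contiguous range max(0, n-q)..p, which is emitted directly.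
import Mathlib
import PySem

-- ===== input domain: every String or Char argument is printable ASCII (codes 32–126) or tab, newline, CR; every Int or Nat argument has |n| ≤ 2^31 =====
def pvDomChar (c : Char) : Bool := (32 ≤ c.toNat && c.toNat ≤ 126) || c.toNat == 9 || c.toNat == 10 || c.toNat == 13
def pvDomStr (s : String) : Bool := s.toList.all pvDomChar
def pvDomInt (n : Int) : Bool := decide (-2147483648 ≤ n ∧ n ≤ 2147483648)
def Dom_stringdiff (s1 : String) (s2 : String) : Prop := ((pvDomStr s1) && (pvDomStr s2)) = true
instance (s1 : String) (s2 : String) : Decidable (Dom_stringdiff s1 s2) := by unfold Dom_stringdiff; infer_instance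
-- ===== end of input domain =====

-- B replaces A's quadratic per-index startswith/endswith scan by computing the longest common
-- prefix and suffix once: the valid split indices then form one contiguous range (objective: faster).


-- ===== PORT A =====
-- the for-loop of A over i in range(len(t1)+1), after t1/t2 are oriented (t1 the shorter string)
def stringdiffLoop (t1 : String) (t2 : String) : List String :=
  (PySem.List.pyRange 0 (PySem.Str.len t1 + 1)).foldl
    (fun L i =>
      -- x1 = t1[i:len(t1)], x2 = t1[0:i]
      if PySem.Str.startswith t2 (PySem.Str.slice t1 (some 0) (some i))
         && PySem.Str.endswith t2 (PySem.Str.slice t1 (some i) (some (PySem.Str.len t1))) then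
        L ++ [PySem.Str.slice t2 (some i) (some (PySem.Str.len t2 - (PySem.Str.len t1 - i)))]
      else L) []

def stringdiff (s1 : String) (s2 : String) : List String :=
  if PySem.Str.len s1 < PySem.Str.len s2 then stringdiffLoop s1 s2 else stringdiffLoop s2 s1

-- ===== PORT B =====
-- helper _lcp: length of the longest common prefix
def lcpChars : List Char → List Char → Nat
  | a :: as, b :: bs => if a = b then lcpChars as bs + 1 else 0
  | _, _ => 0

-- the comprehension of B over the contiguous range of valid split indices
def stringdiffRange (t1 : String) (t2 : String) : List String :=
  (PySem.List.pyRange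
      (max 0 (PySem.Str.len t1 - (lcpChars t1.toList.reverse t2.toList.reverse : Int)))
      ((lcpChars t1.toList t2.toList : Int) + 1)).map
    (fun i => PySem.Str.slice t2 (some i) (some (PySem.Str.len t2 - PySem.Str.len t1 + i)))

def stringdiff_alt (s1 : String) (s2 : String) : List String :=
  if PySem.Str.len s1 < PySem.Str.len s2 then stringdiffRange s1 s2 else stringdiffRange s2 s1

-- ===== PRECONDITION & SPEC =====
def Spec_stringdiff (s1 : String) (s2 : String) (out : List String) : Prop := out = stringdiff_alt s1 s2
instance (s1 : String) (s2 : String) (out : List String) : Decidable (Spec_stringdiff s1 s2 out) := by unfold Spec_stringdiff; infer_instance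

-- ===== CLAIM (what is proved, stated in full; the proofs are below) =====
def Claim_equal_stringdiff : Prop := ∀ (s1 : String) (s2 : String), Dom_stringdiff s1 s2 → Spec_stringdiff s1 s2 (stringdiff s1 s2)

-- ===== LEMMAS AND PROOFS =====

theorem lcpChars_le_left (a b : List Char) : lcpChars a b ≤ a.length := by
  induction a generalizing b with
  | nil => simp [lcpChars]
  | cons x as ih =>
    cases b with
    | nil => simp [lcpChars]
    | cons y bs =>
      simp only [lcpChars]
      split_ifs
      · simpa using ih bs
      · simp

theorem take_prefix_iff_le_lcp (a b : List Char) (i : Nat)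
    (hi : i ≤ a.length) (hab : a.length ≤ b.length) :
    a.take i <+: b ↔ i ≤ lcpChars a b := by
  induction a generalizing b i with
  | nil =>
    have : i = 0 := by simpa using hi
    subst this
    simp [lcpChars]
  | cons x as ih =>
    cases i with
    | zero => simp
    | succ k =>
      cases b with
      | nil => simp at hab
      | cons y bs =>
        simp only [List.take_succ_cons, List.cons_prefix_cons, lcpChars]
        split_ifs with hxy
        · subst hxy
          have := ih bs k (by simpa using hi) (by simpa using hab)
          simp [this]
        · constructor
          · rintro ⟨h1, _⟩; exact absurd h1 hxy
          · omega

theorem filter_interval_pyRange (k : Nat) : ∀ (lo hi a b : Int),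
    (b - a).toNat ≤ k → a ≤ lo → hi < b →
    List.filter (fun i => decide (lo ≤ i ∧ i ≤ hi)) (PySem.List.pyRange a b)
      = PySem.List.pyRange lo (hi + 1) := by
  induction k with
  | zero =>
    intro lo hi a b hk ha hb
    have hba : b ≤ a := by omega
    rw [PySem.List.pyRange_one_eq_nil hba, PySem.List.pyRange_one_eq_nil (by omega)]
    rfl
  | succ k ih =>
    intro lo hi a b hk ha hb
    by_cases hba : b ≤ a
    · rw [PySem.List.pyRange_one_eq_nil hba, PySem.List.pyRange_one_eq_nil (by omega)]
      rfl
    · have hab : a < b := by omega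
      rw [PySem.List.pyRange_one_cons hab, List.filter_cons]
      rcases lt_or_eq_of_le ha with hlt | heq
      · have : (decide (lo ≤ a ∧ a ≤ hi)) = false := by
          simp only [decide_eq_false_iff_not]; omega
        rw [this]
        simp only [Bool.false_eq_true, if_false]
        exact ih lo hi (a + 1) b (by omega) (by omega) hb
      · subst heq
        by_cases hahi : a ≤ hi
        · have : (decide (a ≤ a ∧ a ≤ hi)) = true := by simp [hahi]
          rw [this, if_pos rfl]
          rw [PySem.List.pyRange_one_cons (show a < hi + 1 by omega)]
          congr 1
          rw [List.filter_congr (q := fun i => decide (a + 1 ≤ i ∧ i ≤ hi))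
              (by intro x hx
                  rw [PySem.List.mem_pyRange_one] at hx
                  simp only [decide_eq_decide]
                  omega)]
          exact ih (a + 1) hi (a + 1) b (by omega) le_rfl hb
        · have : (decide (a ≤ a ∧ a ≤ hi)) = false := by
            simp only [decide_eq_false_iff_not]; omega
          rw [this]
          simp only [Bool.false_eq_true, if_false]
          rw [PySem.List.pyRange_one_eq_nil (show hi + 1 ≤ a by omega)]
          rw [List.filter_eq_nil_iff.mpr]
          intro x hx
          rw [PySem.List.mem_pyRange_one] at hx
          simp only [decide_eq_true_eq]
          omega

theorem loop_eq_range (t1 t2 : String) (h : t1.toList.length ≤ t2.toList.length) :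
    stringdiffLoop t1 t2 = stringdiffRange t1 t2 := by
  unfold stringdiffLoop stringdiffRange
  rw [PySem.List.foldl_append_if
      (p := fun i =>
        PySem.Str.startswith t2 (PySem.Str.slice t1 (some 0) (some i))
          && PySem.Str.endswith t2 (PySem.Str.slice t1 (some i) (some (PySem.Str.len t1))))
      (f := fun i => PySem.Str.slice t2 (some i) (some (PySem.Str.len t2 - (PySem.Str.len t1 - i))))]
  rw [List.nil_append]
  set N := t1.toList.length with hN
  set M := t2.toList.length with hM
  set P := lcpChars t1.toList t2.toList with hP
  set Q := lcpChars t1.toList.reverse t2.toList.reverse with hQ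
  have hPN : P ≤ N := lcpChars_le_left _ _
  have hQN : Q ≤ N := by
    have := lcpChars_le_left t1.toList.reverse t2.toList.reverse
    simpa using this
  have hlen1 : PySem.Str.len t1 = (N : Int) := by rw [PySem.Str.len_eq]
  have hlen2 : PySem.Str.len t2 = (M : Int) := by rw [PySem.Str.len_eq]
  rw [hlen1, hlen2]
  -- rewrite the filter condition into the interval condition
  rw [List.filter_congr (q := fun i => decide (max 0 ((N : Int) - (Q : Int)) ≤ i ∧ i ≤ (P : Int)))
      (by
        intro i hi
        rw [PySem.List.mem_pyRange_one] at hi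
        have h0 : 0 ≤ i := hi.1
        have hiN : i ≤ (N : Int) := by omega
        have hj : i = ((i.toNat : Nat) : Int) := by omega
        have hjN : i.toNat ≤ N := by omega
        rw [Bool.eq_iff_iff]
        simp only [PySem.Str.startswith_eq, PySem.Str.endswith_eq, PySem.Str.toList_slice,
          PySem.Chars.slice_eq_listSlice, Bool.and_eq_true, decide_eq_true_eq]
        rw [PySem.List.slice_zero_start, PySem.List.slice_to _ h0,
          PySem.List.slice_toNat _ h0 (by positivity)]
        have hdrop : (List.drop i.toNat t1.toList).take ((N : Int).toNat - i.toNat)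
            = List.drop i.toNat t1.toList := by
          apply List.take_of_length_le
          simp [hN]
        rw [hdrop, PySem.Chars.startswith_iff, PySem.Chars.endswith_iff]
        rw [take_prefix_iff_le_lcp t1.toList t2.toList i.toNat hjN h]
        rw [← List.reverse_prefix, List.reverse_drop]
        rw [take_prefix_iff_le_lcp t1.toList.reverse t2.toList.reverse (t1.toList.length - i.toNat)
            (by simp) (by simpa using h)]
        rw [← hP, ← hQ, ← hN]
        omega)]
  rw [filter_interval_pyRange (N + 1).succ (max 0 ((N : Int) - (Q : Int))) (P : Int) 0 ((N : Int) + 1)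
      (by omega) (by positivity) (by omega)]
  apply List.map_congr_left
  intro i hi
  have harith : (M : Int) - ((N : Int) - i) = (M : Int) - (N : Int) + i := by ring
  rw [harith]

-- ===== VERDICT (by name: the statement is the Claim_ definition above) =====
theorem stringdiff_spec : Claim_equal_stringdiff := by
  intro s1 s2 _
  unfold Spec_stringdiff stringdiff stringdiff_alt
  have hlen : ∀ s : String, PySem.Str.len s = (s.toList.length : Int) := PySem.Str.len_eq
  split_ifs with hc
  · exact loop_eq_range s1 s2 (by rw [hlen, hlen] at hc; exact_mod_cast hc.le)
  · exact loop_eq_range s2 s1 (by rw [hlen, hlen] at hc; omega)
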